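-- pv_equiv track=rewrite | github.com/Artur-ICE/variant15 | 5.18434.py | f
-- ===== SOURCE A (Python) =====
-- def f(n):
--     a = bin(n)[2:]
--     b = 0
--     for i in range(0, len(a)):
--         b += int(a[i])
--     b = b % 2
--     c = str(a) + str(b)
--     d = 0
--     for j in range(0, len(c)):
--         d = d + int(c[j])
--     d = d % 2
--     e = int(str(c) + str(d), 2) # не забывай про двойку идиот, мне это стоило 5 минут разбирательств
--     return e
-- ===== SOURCE B (Python) =====
-- def f(n):
--     a = bin(n)[2:]
--     b = a.count('1') % 2
--     return int(a + str(b) + '0', 2)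
-- ===== Notes on version B (the rewrite author's own statement) =====
-- stated objective: simpler
-- what changed: B replaces A's two index-loops with a single '1'-count for the parity bit and appends a constant '0' for A's second parity bit, which is provably always 0 (the bit-sum of a+str(b) is even).
import Mathlib
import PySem

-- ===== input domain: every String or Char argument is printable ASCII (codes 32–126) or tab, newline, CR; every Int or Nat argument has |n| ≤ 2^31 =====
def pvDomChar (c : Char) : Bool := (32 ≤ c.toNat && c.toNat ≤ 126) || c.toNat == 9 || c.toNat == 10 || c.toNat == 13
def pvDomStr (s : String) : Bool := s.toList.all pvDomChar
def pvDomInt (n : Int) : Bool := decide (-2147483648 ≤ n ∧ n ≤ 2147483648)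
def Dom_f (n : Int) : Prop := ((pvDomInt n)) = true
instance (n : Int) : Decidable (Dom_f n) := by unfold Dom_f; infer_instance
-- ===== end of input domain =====

-- B simplifies A: the parity bit b is a '1'-count, and A's second parity bit d is provably
-- always 0 (the bit-sum of a+str(b) is even), so B appends the constant '0'. Objective: simpler.

-- ===== PORT A =====
def f (n : Int) : Int :=
  let a := PySem.List.slice (PySem.Int.toBinChars0b n) (some 2) none      -- a = bin(n)[2:]
  let b := (PySem.List.pyRange 0 (PySem.List.len a) 1).foldl
      (fun acc i => acc + (PySem.Int.ofChars? [PySem.List.pyGetD a i ' ']).getD 0) 0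
      -- b += int(a[i]); ofChars? = none is Python's ValueError (n < 0 gives a 'b' char), excluded by Pre_f
  let b := PySem.Int.mod b 2
  let c := a ++ PySem.Int.toChars b                                       -- c = str(a) + str(b)
  let d := (PySem.List.pyRange 0 (PySem.List.len c) 1).foldl
      (fun acc j => acc + (PySem.Int.ofChars? [PySem.List.pyGetD c j ' ']).getD 0) 0
  let d := PySem.Int.mod d 2
  (PySem.Int.ofCharsBase? (c ++ PySem.Int.toChars d) 2).getD 0            -- int(str(c) + str(d), 2)

-- ===== PORT B =====
def f_alt (n : Int) : Int :=
  let a := PySem.List.slice (PySem.Int.toBinChars0b n) (some 2) none      -- a = bin(n)[2:]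
  let b := PySem.Int.mod ((a.count '1' : Int)) 2                          -- b = a.count('1') % 2
  (PySem.Int.ofCharsBase? (a ++ PySem.Int.toChars b ++ ['0']) 2).getD 0   -- int(a + str(b) + '0', 2)

-- ===== PRECONDITION & SPEC =====
-- Pre_f excludes n < 0, where both Pythons raise ValueError (bin(-5)[2:] = 'b101': A at int('b'), B at int(..., 2)).
def Pre_f (n : Int) : Prop := 0 ≤ n
instance (n : Int) : Decidable (Pre_f n) := by unfold Pre_f; infer_instance
def pvWitness_f : Int := 6

def Spec_f (n : Int) (out : Int) : Prop := out = f_alt n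
instance (n : Int) (out : Int) : Decidable (Spec_f n out) := by unfold Spec_f; infer_instance

-- ===== CLAIM (what is proved, stated in full; the proofs are below) =====
def Claim_equal_f : Prop := ∀ (n : Int), Dom_f n → Pre_f n → Spec_f n (f n)

-- ===== LEMMAS AND PROOFS =====

-- every character Nat.toDigitsCore base 2 pushes is '0' or '1'
lemma toDigitsCore_two_mem (fuel : Nat) : ∀ (m : Nat) (acc : List Char),
    (∀ c ∈ acc, c = '0' ∨ c = '1') → ∀ c ∈ Nat.toDigitsCore 2 fuel m acc, c = '0' ∨ c = '1' := by
  induction fuel with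
  | zero => intro m acc hacc c hc; exact hacc c hc
  | succ fuel ih =>
    intro m acc hacc c hc
    have hd : Nat.digitChar (m % 2) = '0' ∨ Nat.digitChar (m % 2) = '1' := by
      have h2 : m % 2 = 0 ∨ m % 2 = 1 := by omega
      rcases h2 with h | h
      · left; rw [h]; decide
      · right; rw [h]; decide
    have hacc' : ∀ c ∈ Nat.digitChar (m % 2) :: acc, c = '0' ∨ c = '1' := by
      intro c hc
      rcases List.mem_cons.mp hc with h | h
      · rw [h]; exact hd
      · exact hacc c h
    rw [Nat.toDigitsCore] at hc
    by_cases hz : m / 2 = 0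
    · rw [if_pos hz] at hc; exact hacc' c hc
    · rw [if_neg hz] at hc; exact ih (m / 2) _ hacc' c hc

lemma toDigits_two_mem (m : Nat) : ∀ c ∈ Nat.toDigits 2 m, c = '0' ∨ c = '1' :=
  toDigitsCore_two_mem (m + 1) m [] (by intro c hc; cases hc)

-- summing int(ch) over a 0/1-character list counts the '1's
lemma sum01 (cs : List Char) (h : ∀ c ∈ cs, c = '0' ∨ c = '1') (z : Int) :
    cs.foldl (fun acc ch => acc + (PySem.Int.ofChars? [ch]).getD 0) z
      = z + (cs.count '1' : Int) := by
  induction cs generalizing z with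
  | nil => simp
  | cons hd tl ih =>
    have htl : ∀ c ∈ tl, c = '0' ∨ c = '1' := fun c hc => h c (List.mem_cons_of_mem hd hc)
    have v0 : (PySem.Int.ofChars? ['0']).getD 0 = 0 := by decide
    have v1 : (PySem.Int.ofChars? ['1']).getD 0 = 1 := by decide
    rcases h hd List.mem_cons_self with h0 | h0 <;>
      simp [h0, v0, v1, ih htl]; ring

-- both loops, rewritten to plain list folds over the binary digits
lemma loop_eq (cs : List Char) (z : Int) :
    (PySem.List.pyRange 0 (PySem.List.len cs) 1).foldl
      (fun acc i => acc + (PySem.Int.ofChars? [PySem.List.pyGetD cs i ' ']).getD 0) z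
      = cs.foldl (fun acc ch => acc + (PySem.Int.ofChars? [ch]).getD 0) z := by
  have := PySem.List.foldl_pyRange_pyGetD cs ' '
      (fun acc ch => acc + (PySem.Int.ofChars? [ch]).getD 0) z (a := 0) le_rfl
  simpa using this

theorem f_spec : Claim_equal_f := by
  intro n _ hpre
  show f n = f_alt n
  have hn : ¬ n < 0 := not_lt.mpr hpre
  unfold f f_alt
  simp only [PySem.Int.toBinChars0b, if_neg hn]
  rw [PySem.List.slice_from _ (show (0:Int) ≤ 2 by norm_num)]
  simp only [show ((2:Int).toNat) = 2 from rfl, List.drop_succ_cons, List.drop_zero]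
  set ds := Nat.toDigits 2 n.toNat with hds
  have hmem : ∀ c ∈ ds, c = '0' ∨ c = '1' := toDigits_two_mem n.toNat
  rw [loop_eq, sum01 ds hmem 0]
  simp only [zero_add]
  set k : Int := (ds.count '1' : Int) with hk
  have hk0 : 0 ≤ k := by positivity
  set b : Int := PySem.Int.mod k 2 with hb
  have hbe : b = k % 2 := by rw [hb, PySem.Int.mod_eq_emod_of_pos (by norm_num)]
  have hb01 : b = 0 ∨ b = 1 := by omega
  -- characters of str(b) are 0/1 too
  have hbchars : PySem.Int.toChars b = [if b = 1 then '1' else '0'] := by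
    rcases hb01 with h | h <;> rw [h] <;> decide
  have hmemc : ∀ c ∈ ds ++ PySem.Int.toChars b, c = '0' ∨ c = '1' := by
    intro c hc
    rcases List.mem_append.mp hc with h | h
    · exact hmem c h
    · rw [hbchars] at h
      rcases List.mem_singleton.mp h with rfl
      split <;> simp
  rw [loop_eq, sum01 _ hmemc 0]
  simp only [zero_add]
  have hcount : ((ds ++ PySem.Int.toChars b).count '1' : Int) = k + b := by
    rw [List.count_append, hbchars]
    rcases hb01 with h | h <;> simp [h, hk]
  rw [hcount]
  have hd0 : PySem.Int.mod (k + b) 2 = 0 := by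
    rw [PySem.Int.mod_eq_emod_of_pos (by norm_num)]
    omega
  rw [hd0]
  have h0 : PySem.Int.toChars (0:Int) = ['0'] := by decide
  rw [h0, List.append_assoc]

-- ===== VERDICT (by name: the statement is the Claim_ definition above) =====
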